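-- pv_equiv track=rewrite | github.com/tapank/adventofcode | 2022/day06/day06puzzle1.py | first_marker
-- ===== SOURCE A (Python) =====
-- def first_marker(s, l):
--         buffer = []
--         for i, ch in enumerate(s):
--                 buffer.append(ch)
--                 if len(buffer) > l:
--                         buffer.pop(0)
--                 if len(set(buffer)) == l:
--                         return i + 1
--         return -1
-- ===== SOURCE B (Python) =====
-- def first_marker(s, l):
--     # Sliding window via last-occurrence positions: 'start' is the smallest
--     # index such that s[start:i+1] has no repeated character.
--     last = {}
--     start = 0
--     for i, ch in enumerate(s):
--         p = last.get(ch, -1)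
--         if p >= start:
--             start = p + 1
--         last[ch] = i
--         if i + 1 - start >= l:
--             return i + 1
--     return -1
-- ===== Notes on version B (the rewrite author's own statement) =====
-- stated objective: faster
-- what changed: Replaced A's per-step rebuild of a length-l buffer and its set (O(n*l)) by a one-pass sliding window that keeps each character's last occurrence in a dict and advances a window-start pointer, so no buffer or set is ever built.
-- outside the precondition, e.g. on first_marker('abc', -1): A returns -1, B returns 1
import Mathlib
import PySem

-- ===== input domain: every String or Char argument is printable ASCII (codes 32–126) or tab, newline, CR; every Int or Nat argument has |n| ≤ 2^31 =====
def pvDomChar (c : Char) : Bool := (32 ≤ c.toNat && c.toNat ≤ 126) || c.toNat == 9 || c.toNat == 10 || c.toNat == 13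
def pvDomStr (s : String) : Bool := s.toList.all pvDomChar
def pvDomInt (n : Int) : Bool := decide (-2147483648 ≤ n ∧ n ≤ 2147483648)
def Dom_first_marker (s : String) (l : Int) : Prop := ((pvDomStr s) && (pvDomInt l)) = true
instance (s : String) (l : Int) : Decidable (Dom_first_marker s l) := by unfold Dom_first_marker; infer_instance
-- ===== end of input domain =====

-- B replaces A's per-step buffer+set rebuild by a one-pass last-occurrence sliding window (objective: faster, asymptotic).


-- ===== PORT A =====
-- loop over enumerate(s); buffer.pop(0) drops the head (buffer is nonempty there, having just been appended to)
def pvLoopA (l : Int) : List (Int × Char) → List Char → Int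
  | [], _ => -1
  | (i, ch) :: rest, buffer =>
      let buffer1 := buffer ++ [ch]
      let buffer2 := if (buffer1.length : Int) > l then buffer1.drop 1 else buffer1
      if ((PySem.Set.ofList buffer2).length : Int) = l then i + 1
      else pvLoopA l rest buffer2

def first_marker (s : String) (l : Int) : Int :=
  pvLoopA l (PySem.List.enumerate s.toList 0) []

-- ===== PORT B =====
def pvLoopB (l : Int) : List (Int × Char) → PySem.Dict Char Int → Int → Int
  | [], _, _ => -1
  | (i, ch) :: rest, last, start =>
      let p := last.getD ch (-1)
      let start1 := if p ≥ start then p + 1 else start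
      let last1 := last.insert ch i
      if i + 1 - start1 ≥ l then i + 1
      else pvLoopB l rest last1 start1

def first_marker_alt (s : String) (l : Int) : Int :=
  pvLoopB l (PySem.List.enumerate s.toList 0) PySem.Dict.empty 0

-- ===== PRECONDITION & SPEC =====
-- Pre_ restricts to the natural domain of nonnegative window lengths l; for l < 0
-- (a meaningless request, outside the task's domain) A happens to return -1 while B returns 1 on nonempty s.
def Pre_first_marker (s : String) (l : Int) : Prop := 0 ≤ l
instance (s : String) (l : Int) : Decidable (Pre_first_marker s l) := by unfold Pre_first_marker; infer_instance

def pvWitness_first_marker : String × Int := ("mjqjpqmgbljsphdztnvjfqwrcgsmlb", 4)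

def Spec_first_marker (s : String) (l : Int) (out : Int) : Prop := out = first_marker_alt s l
instance (s : String) (l : Int) (out : Int) : Decidable (Spec_first_marker s l out) := by unfold Spec_first_marker; infer_instance

-- ===== CLAIM (what is proved, stated in full; the proofs are below) =====
def Claim_equal_first_marker : Prop := ∀ (s : String) (l : Int), Dom_first_marker s l → Pre_first_marker s l → Spec_first_marker s l (first_marker s l)

-- ===== LEMMAS AND PROOFS =====

-- |set(xs)| = |xs| iff xs has no duplicates
lemma pv_ofList_length_eq_iff (xs : List Char) :
    (PySem.Set.ofList xs).length = xs.length ↔ xs.Nodup := by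
  constructor
  · intro h
    have hperm : (PySem.Set.ofList xs).Perm xs.dedup := by
      rw [List.perm_ext_iff_of_nodup (PySem.Set.nodup_ofList xs) (List.nodup_dedup xs)]
      intro a; rw [PySem.Set.mem_ofList, List.mem_dedup]
    have hlen : xs.dedup.length = xs.length := by rw [← hperm.length_eq, h]
    have := (List.dedup_sublist xs).eq_of_length hlen
    rw [← List.dedup_eq_self]; exact this
  · intro h; exact congrArg List.length (PySem.Set.ofList_eq_self_of_nodup xs h)

lemma pv_drop_append (pref : List Char) (c : Char) (k : Nat) :
    (pref ++ [c]).drop k = pref.drop k ++ if k ≤ pref.length then [c] else [] := by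
  rw [List.drop_append]
  split_ifs with h
  · have hk : k - pref.length = 0 := by omega
    rw [hk, List.drop_zero]
  · have hp : pref.drop k = [] := List.drop_eq_nil_of_le (by omega)
    have hc : ([c] : List Char).drop (k - pref.length) = [] :=
      List.drop_eq_nil_of_le (by simp; omega)
    rw [hp, hc]

lemma pv_nodup_append_singleton (xs : List Char) (c : Char) :
    (xs ++ [c]).Nodup ↔ xs.Nodup ∧ c ∉ xs := by
  simp [List.nodup_append]
  intro _
  constructor
  · intro h hc
    exact h c hc rfl
  · intro h a ha he
    exact h (he ▸ ha)

lemma pv_loop_eq (l : Int) (hl : 0 ≤ l) :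
    ∀ (suf pref buf : List Char) (last : PySem.Dict Char Int) (start : Int),
      buf = pref.drop (pref.length - l.toNat) →
      0 ≤ start → start ≤ (pref.length : Int) →
      (∀ j : Nat, ((pref.drop j).Nodup ↔ start ≤ (j : Int))) →
      (∀ c : Char, last.getD c (-1) < (pref.length : Int) ∧
        ∀ j : Nat, ((j : Int) ≤ last.getD c (-1) ↔ c ∈ pref.drop j)) →
      pvLoopA l (PySem.List.enumerate suf (pref.length : Int)) buf
        = pvLoopB l (PySem.List.enumerate suf (pref.length : Int)) last start := by
  intro suf
  induction suf with
  | nil =>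
      intro pref buf last start _ _ _ _ _
      simp [PySem.List.enumerate_nil, pvLoopA, pvLoopB]
  | cons c suf ih =>
      intro pref buf last start hbuf h0 h1 hstart hdict
      have hL : ((l.toNat : Int)) = l := Int.toNat_of_nonneg hl
      rw [PySem.List.enumerate_cons]
      simp only [pvLoopA, pvLoopB]
      -- abbreviations matching the unfolded bodies
      have hp_lt := (hdict c).1
      have hp_mem := (hdict c).2
      have hs1 : (if last.getD c (-1) ≥ start then last.getD c (-1) + 1 else start)
          = max start (last.getD c (-1) + 1) := by split_ifs <;> omega
      -- step equality for A's buffer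
      have hb2 : (if ((buf ++ [c]).length : Int) > l then (buf ++ [c]).drop 1 else buf ++ [c])
          = (pref ++ [c]).drop (pref.length + 1 - l.toNat) := by
        have hblen : buf.length = pref.length - (pref.length - l.toNat) := by
          rw [hbuf, List.length_drop]
        by_cases hcase : pref.length + 1 ≤ l.toNat
        · have hlc1 : (buf ++ [c]).length = buf.length + 1 := by simp
          have hnot : ¬ (((buf ++ [c]).length : Int) > l) := by
            rw [hlc1]; push_cast; omega
          rw [if_neg hnot, hbuf]
          have hz1 : pref.length - l.toNat = 0 := by omega
          have hz2 : pref.length + 1 - l.toNat = 0 := by omega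
          rw [hz1, hz2, List.drop_zero, List.drop_zero]
        · have hlc1 : (buf ++ [c]).length = buf.length + 1 := by simp
          have hyes : (((buf ++ [c]).length : Int) > l) := by
            rw [hlc1]; push_cast; omega
          rw [if_pos hyes, hbuf]
          by_cases hz : l.toNat = 0
          · have h1' : pref.length - l.toNat = pref.length := by omega
            rw [h1', List.drop_length, List.nil_append]
            have h2' : pref.length + 1 - l.toNat = pref.length + 1 := by omega
            rw [h2']
            have hr : List.drop (pref.length + 1) (pref ++ [c]) = [] :=
              List.drop_eq_nil_of_le (by simp)
            rw [hr]
            simp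
          · rw [pv_drop_append pref c (pref.length + 1 - l.toNat),
                if_pos (by omega),
                pv_drop_append (pref.drop (pref.length - l.toNat)) c 1,
                if_pos (by rw [List.length_drop]; omega),
                List.drop_drop]
            have harith : pref.length - l.toNat + 1 = pref.length + 1 - l.toNat := by omega
            rw [harith]
      rw [hb2, hs1]
      -- new start characterisation
      have hstart' : ∀ j : Nat, (((pref ++ [c]).drop j).Nodup ↔ max start (last.getD c (-1) + 1) ≤ (j : Int)) := by
        intro j
        rw [pv_drop_append]
        split_ifs with hj
        · rw [pv_nodup_append_singleton]
          have hm := hp_mem j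
          have hn := hstart j
          constructor
          · rintro ⟨hn1, hn2⟩
            have hnm : ¬ ((j : Int) ≤ last.getD c (-1)) := fun hh => hn2 (hm.mp hh)
            have := hn.mp hn1
            omega
          · intro h
            refine ⟨hn.mpr (by omega), fun hc => ?_⟩
            have := hm.mpr hc
            omega
        · have : pref.drop j = [] := List.drop_eq_nil_of_le (by omega)
          rw [this]
          simp only [List.nil_append, List.nodup_nil, true_iff]
          omega
      -- condition equivalence
      have hcond : (((PySem.Set.ofList ((pref ++ [c]).drop (pref.length + 1 - l.toNat))).length : Int) = l)
          ↔ ((pref.length : Int) + 1 - max start (last.getD c (-1) + 1) ≥ l) := by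
        have hlen2 : ((pref ++ [c]).drop (pref.length + 1 - l.toNat)).length
            = (pref.length + 1) - (pref.length + 1 - l.toNat) := by
          rw [List.length_drop, List.length_append, List.length_singleton]
        have hle := PySem.Set.length_ofList_le ((pref ++ [c]).drop (pref.length + 1 - l.toNat))
        by_cases hbig : l.toNat ≤ pref.length + 1
        · have hbl : ((pref ++ [c]).drop (pref.length + 1 - l.toNat)).length = l.toNat := by omega
          have hnd := pv_ofList_length_eq_iff ((pref ++ [c]).drop (pref.length + 1 - l.toNat))
          rw [hbl] at hnd
          have hw := hstart' (pref.length + 1 - l.toNat)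
          constructor
          · intro h
            have hnat : (PySem.Set.ofList ((pref ++ [c]).drop (pref.length + 1 - l.toNat))).length = l.toNat := by omega
            have := hw.mp (hnd.mp hnat)
            push_cast at this ⊢
            omega
          · intro h
            have : max start (last.getD c (-1) + 1) ≤ ((pref.length + 1 - l.toNat : Nat) : Int) := by
              omega
            have hnat := hnd.mpr (hw.mpr this)
            omega
        · constructor
          · intro h; exfalso; omega
          · intro h; exfalso; omega
      by_cases hcb : ((pref.length : Int) + 1 - max start (last.getD c (-1) + 1) ≥ l)
      · rw [if_pos hcb, if_pos (hcond.mpr hcb)]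
      · rw [if_neg hcb, if_neg (fun hh => hcb (hcond.mp hh))]
        have harg : ((pref.length : Int) + 1) = (((pref ++ [c]).length : Nat) : Int) := by
          rw [List.length_append, List.length_singleton]; push_cast; ring
        rw [harg]
        apply ih
        · rw [List.length_append, List.length_singleton]
        · omega
        · rw [List.length_append, List.length_singleton]; push_cast; omega
        · exact hstart'
        · intro c'
          rw [PySem.Dict.getD_insert]
          split_ifs with hc'
          · subst hc'
            constructor
            · rw [List.length_append, List.length_singleton]; push_cast; omega
            · intro j
              rw [pv_drop_append]
              split_ifs with hj
              · simp only [List.mem_append, List.mem_singleton]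
                constructor
                · intro _; simp
                · intro _; omega
              · have : pref.drop j = [] := List.drop_eq_nil_of_le (by omega)
                rw [this]
                simp only [List.nil_append, List.not_mem_nil, iff_false]
                omega
          · have hd1 := (hdict c').1
            have hd2 := (hdict c').2
            constructor
            · rw [List.length_append, List.length_singleton]; push_cast; omega
            · intro j
              rw [pv_drop_append, hd2 j]
              split_ifs with hj
              · simp only [List.mem_append, List.mem_singleton]
                constructor
                · intro h; left; exact h
                · rintro (h | h)
                  · exact h
                  · exact absurd h hc'
              · have : pref.drop j = [] := List.drop_eq_nil_of_le (by omega)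
                rw [this, List.nil_append]

-- ===== VERDICT (by name: the statement is the Claim_ definition above) =====
theorem first_marker_spec : Claim_equal_first_marker := by
  intro s l _ hpre
  unfold Spec_first_marker first_marker first_marker_alt
  have h := pv_loop_eq l hpre s.toList [] [] PySem.Dict.empty 0
  simp only [List.length_nil, Nat.cast_zero] at h
  apply h
  · simp
  · exact le_refl 0
  · exact le_refl 0
  · intro j; simp
  · intro c
    constructor
    · rw [PySem.Dict.getD_empty]; norm_num
    · intro j; rw [PySem.Dict.getD_empty]; simp; omega
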